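-- pv_equiv track=rewrite | github.com/charliesound/SERVICIOS_CINE | scripts/export_comfyui_models_inventory.py | choose_first_by_rules
-- ===== SOURCE A (Python) =====
-- from typing import Any
--
-- def normalize_name(value: str) -> str:
--     return value.lower().replace("_", " ").replace("-", " ")
--
-- def dedupe_models(models: list[dict[str, Any]]) -> list[dict[str, Any]]:
--     seen: set[tuple[str, str, str]] = set()
--     result: list[dict[str, Any]] = []
--
--     for model in models:
--         key = (
--             str(model.get("name", "")),
--             str(model.get("category", "")),
--             str(model.get("relative_path", "")),
--         )
--         if key in seen:
--             continue
--         seen.add(key)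
--         result.append(model)
--
--     return result
--
-- def choose_first_by_rules(models: list[dict[str, Any]], rules: list[list[str]]) -> str | None:
--     deduped_models = dedupe_models(models)
--
--     for keywords in rules:
--         for model in deduped_models:
--             normalized = normalize_name(model["name"])
--             if all(keyword.lower() in normalized for keyword in keywords):
--                 return model["name"]
--
--     if deduped_models:
--         return deduped_models[0]["name"]
--
--     return None
-- ===== SOURCE B (Python) =====
-- def _normalize(value: str) -> str:
--     return value.lower().replace("_", " ").replace("-", " ")
--
--
-- def _dedupe(models):
--     seen = set()
--     out = []
--     for m in models:
--         k = (str(m.get("name", "")), str(m.get("category", "")), str(m.get("relative_path", "")))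
--         if k not in seen:
--             seen.add(k)
--             out.append(m)
--     return out
--
--
-- def choose_first_by_rules(models, rules):
--     deduped = _dedupe(models)
--     lowered = [[kw.lower() for kw in r] for r in rules]
--     sentinel = len(rules)
--     best_i = sentinel
--     best_name = None
--     for m in deduped:
--         name = m["name"]
--         norm = _normalize(name)
--         i = next((j for j, kws in enumerate(lowered) if all(k in norm for k in kws)), sentinel)
--         if i < best_i:
--             best_i = i
--             best_name = name
--     if best_i < sentinel:
--         return best_name
--     if deduped:
--         return deduped[0]["name"]
--     return None
-- ===== Notes on version B (the rewrite author's own statement) =====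
-- stated objective: alternative
-- what changed: A scans rules in the outer loop and rescans all models per rule; B makes a single pass over the deduped models, computing each model's first-matching-rule index once and keeping the earliest model with the minimal index.
-- outside the precondition, e.g. on choose_first_by_rules([{'name': 'ab'}, {}], [['a']]): A returns 'ab', B raises KeyError
import Mathlib
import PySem

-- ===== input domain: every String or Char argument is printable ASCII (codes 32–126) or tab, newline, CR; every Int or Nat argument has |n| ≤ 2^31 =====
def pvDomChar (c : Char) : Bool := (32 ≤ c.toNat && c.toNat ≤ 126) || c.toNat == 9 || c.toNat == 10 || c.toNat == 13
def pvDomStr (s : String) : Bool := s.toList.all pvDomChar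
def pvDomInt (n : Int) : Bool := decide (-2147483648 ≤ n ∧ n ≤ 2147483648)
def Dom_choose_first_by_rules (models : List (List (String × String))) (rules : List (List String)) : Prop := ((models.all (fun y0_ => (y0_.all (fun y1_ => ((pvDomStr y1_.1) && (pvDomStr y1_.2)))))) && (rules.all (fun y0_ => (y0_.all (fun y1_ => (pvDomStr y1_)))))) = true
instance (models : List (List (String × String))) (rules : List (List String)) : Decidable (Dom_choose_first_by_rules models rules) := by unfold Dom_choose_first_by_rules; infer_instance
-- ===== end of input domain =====

-- B replaces A's rules-outer/models-inner early-return scan by a single pass over the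
-- deduped models keeping the earliest model with the minimal first-matching-rule index
-- (alternative decomposition, similar cost).


-- ===== PORT A =====
def normalize_name (value : String) : String :=
  PySem.Str.replace (PySem.Str.replace (PySem.Str.lower value) "_" " ") "-" " "

-- key = (str(model.get("name","")), str(model.get("category","")), str(model.get("relative_path","")))
def pvA_key (m : List (String × String)) : String × String × String :=
  ((PySem.Dict.mk m).getD "name" "", (PySem.Dict.mk m).getD "category" "", (PySem.Dict.mk m).getD "relative_path" "")

def pvA_dedupeLoop (ms : List (List (String × String))) (seen : PySem.Set (String × String × String)) (result : List (List (String × String))) : List (List (String × String)) :=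
  match ms with
  | [] => result
  | m :: rest =>
    if PySem.Set.contains seen (pvA_key m) then pvA_dedupeLoop rest seen result
    else pvA_dedupeLoop rest (PySem.Set.add seen (pvA_key m)) (result ++ [m])

def dedupe_models (models : List (List (String × String))) : List (List (String × String)) :=
  pvA_dedupeLoop models PySem.Set.empty []

-- all(keyword.lower() in normalized for keyword in keywords); model["name"] is a raising
-- lookup in Python: inside Pre_ every model has key "name", so getD equals it there.
def pvA_matches (keywords : List String) (m : List (String × String)) : Bool :=
  keywords.all (fun kw =>
    PySem.Str.isIn (PySem.Str.lower kw) (normalize_name ((PySem.Dict.mk m).getD "name" "")))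

def pvA_scan (keywords : List String) (ms : List (List (String × String))) : Option String :=
  match ms with
  | [] => none
  | m :: rest =>
    if pvA_matches keywords m then some ((PySem.Dict.mk m).getD "name" "")
    else pvA_scan keywords rest

def pvA_ruleLoop (rules : List (List String)) (D : List (List (String × String))) : Option String :=
  match rules with
  | [] => none
  | kws :: rest =>
    match pvA_scan kws D with
    | some n => some n
    | none => pvA_ruleLoop rest D

def choose_first_by_rules (models : List (List (String × String))) (rules : List (List String)) : Option String :=
  let D := dedupe_models models
  match pvA_ruleLoop rules D with
  | some n => some n
  | none =>
    match D with
    | [] => none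
    | m :: _ => some ((PySem.Dict.mk m).getD "name" "")

-- ===== PORT B =====
-- Source B's _normalize is textually identical to A's normalize_name; the shared
-- definition normalize_name is used for both ports.
def pvB_dedupe (models : List (List (String × String))) : List (List (String × String)) :=
  (models.foldl
    (fun (st : PySem.Set (String × String × String) × List (List (String × String))) m =>
      let k := ((PySem.Dict.mk m).getD "name" "", (PySem.Dict.mk m).getD "category" "",
                (PySem.Dict.mk m).getD "relative_path" "")
      if PySem.Set.contains st.1 k then st else (PySem.Set.add st.1 k, st.2 ++ [m]))
    (PySem.Set.empty, [])).2

-- i = index of the first rule (lowered keywords) all of whose keywords occur in norm;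
-- List.findIdx returns lowered.length (= the sentinel len(rules)) when none matches.
def pvB_step (lowered : List (List String)) (st : Nat × Option String) (m : List (String × String)) : Nat × Option String :=
  let name := (PySem.Dict.mk m).getD "name" ""
  let norm := normalize_name name
  let i := lowered.findIdx (fun kws => kws.all (fun k => PySem.Str.isIn k norm))
  if i < st.1 then (i, some name) else st

def choose_first_by_rules_alt (models : List (List (String × String))) (rules : List (List String)) : Option String :=
  let D := pvB_dedupe models
  let lowered := rules.map (fun r => r.map PySem.Str.lower)
  let sentinel := rules.length
  let best := D.foldl (pvB_step lowered) (sentinel, none)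
  if best.1 < sentinel then best.2
  else
    match D with
    | [] => none
    | m :: _ => some ((PySem.Dict.mk m).getD "name" "")

-- ===== PRECONDITION & SPEC =====
-- Pre_ excludes models without a "name" key: there Python A's model["name"] (or B's) raises
-- KeyError on every examined model (A can still return when an earlier model already matched
-- the first rule — see the claim's cite; B raises there too).
def Pre_choose_first_by_rules (models : List (List (String × String))) (rules : List (List String)) : Prop :=
  ∀ m ∈ models, (PySem.Dict.mk m).contains "name" = true
instance (models : List (List (String × String))) (rules : List (List String)) : Decidable (Pre_choose_first_by_rules models rules) := by unfold Pre_choose_first_by_rules; infer_instance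

def pvWitness_choose_first_by_rules : (List (List (String × String))) × List (List String) :=
  ([[("name", "VAE_model")], [("name", "clip-g")]], [["clip"], ["vae"]])

def Spec_choose_first_by_rules (models : List (List (String × String))) (rules : List (List String)) (out : Option String) : Prop := out = choose_first_by_rules_alt models rules
instance (models : List (List (String × String))) (rules : List (List String)) (out : Option String) : Decidable (Spec_choose_first_by_rules models rules out) := by unfold Spec_choose_first_by_rules; infer_instance

-- ===== CLAIM (what is proved, stated in full; the proofs are below) =====
def Claim_equal_choose_first_by_rules : Prop := ∀ (models : List (List (String × String))) (rules : List (List String)), Dom_choose_first_by_rules models rules → Pre_choose_first_by_rules models rules → Spec_choose_first_by_rules models rules (choose_first_by_rules models rules)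

-- ===== LEMMAS AND PROOFS =====

def pvName (m : List (String × String)) : String := (PySem.Dict.mk m).getD "name" ""

def pvMatchIdx (rules : List (List String)) (m : List (String × String)) : Nat :=
  rules.findIdx (fun kws => pvA_matches kws m)

def pvFold (f : List (String × String) → Nat) (D : List (List (String × String))) (st : Nat × Option String) : Nat × Option String :=
  D.foldl (fun st m => if f m < st.1 then (f m, some (pvName m)) else st) st

theorem pvB_step_eq (rules : List (List String)) :
    pvB_step (rules.map (fun r => r.map PySem.Str.lower)) =
      fun st m => if pvMatchIdx rules m < st.1 then (pvMatchIdx rules m, some (pvName m)) else st := by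
  funext st m
  simp [pvB_step, pvMatchIdx, pvName, pvA_matches, normalize_name,
    List.findIdx_map, List.all_map, Function.comp_def]

theorem pvFoldB_eq (rules : List (List String)) (D : List (List (String × String))) (st : Nat × Option String) :
    D.foldl (pvB_step (rules.map (fun r => r.map PySem.Str.lower))) st = pvFold (pvMatchIdx rules) D st := by
  rw [pvB_step_eq]; rfl

theorem pvFold_stable (f : List (String × String) → Nat) (D : List (List (String × String))) (n : Option String) :
    pvFold f D (0, n) = (0, n) := by
  induction D with
  | nil => rfl
  | cons m rest ih =>
    simp only [pvFold, List.foldl_cons] at ih ⊢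
    rw [if_neg (Nat.not_lt_zero _)]
    exact ih

theorem pvFold_shift (f f' : List (String × String) → Nat) (D : List (List (String × String)))
    (h : ∀ m ∈ D, f' m = f m + 1) (b : Nat) (n : Option String) :
    pvFold f' D (b + 1, n) = ((pvFold f D (b, n)).1 + 1, (pvFold f D (b, n)).2) := by
  induction D generalizing b n with
  | nil => rfl
  | cons m rest ih =>
    have hm := h m (List.mem_cons_self ..)
    have hrest : ∀ x ∈ rest, f' x = f x + 1 := fun x hx => h x (List.mem_cons_of_mem _ hx)
    simp only [pvFold, List.foldl_cons] at ih ⊢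
    rw [hm]
    by_cases hlt : f m < b
    · have : f m + 1 < b + 1 := by omega
      simp only [hlt, this, if_pos]
      exact ih hrest (f m) (some (pvName m))
    · have : ¬ f m + 1 < b + 1 := by omega
      simp only [hlt, this, if_neg, not_false_iff]
      exact ih hrest b n

theorem pvScan_none (r : List String) (D : List (List (String × String)))
    (h : pvA_scan r D = none) : ∀ m ∈ D, pvA_matches r m = false := by
  induction D with
  | nil => intro m hm; cases hm
  | cons m rest ih =>
    intro x hx
    rw [pvA_scan] at h
    by_cases hm : pvA_matches r m
    · simp [hm] at h
    · rcases List.mem_cons.mp hx with rfl | hx'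
      · simpa using hm
      · exact ih (by simpa [hm] using h) x hx'

theorem pvMatchIdx_cons (r : List String) (rs : List (List String)) (m : List (String × String)) :
    pvMatchIdx (r :: rs) m = if pvA_matches r m then 0 else pvMatchIdx rs m + 1 := by
  simp [pvMatchIdx, List.findIdx_cons]

theorem pvFold_zero (r : List String) (rs : List (List String)) (D : List (List (String × String)))
    (nm : String) (h : pvA_scan r D = some nm) (b : Nat) (hb : 1 ≤ b) (n : Option String) :
    pvFold (pvMatchIdx (r :: rs)) D (b, n) = (0, some nm) := by
  induction D generalizing b n with
  | nil => cases h
  | cons m rest ih =>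
    rw [pvA_scan] at h
    by_cases hm : pvA_matches r m
    · simp only [hm, if_pos] at h
      have hidx : pvMatchIdx (r :: rs) m = 0 := by rw [pvMatchIdx_cons, if_pos hm]
      simp only [pvFold, List.foldl_cons, hidx, if_pos (by omega : 0 < b)]
      have hnm : pvName m = nm := by simpa [pvName] using h
      have hst := pvFold_stable (pvMatchIdx (r :: rs)) rest (some (pvName m))
      simp only [pvFold] at hst
      rw [hst, hnm]
    · simp only [hm, if_neg, Bool.false_eq_true, not_false_iff] at h
      have hidx : pvMatchIdx (r :: rs) m = pvMatchIdx rs m + 1 := by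
        rw [pvMatchIdx_cons, if_neg (by simpa using hm)]
      simp only [pvFold, List.foldl_cons, hidx]
      by_cases hlt : pvMatchIdx rs m + 1 < b
      · rw [if_pos hlt]
        exact ih h (pvMatchIdx rs m + 1) (by omega) _
      · rw [if_neg hlt]
        exact ih h b hb n

theorem pvKey2 (rules : List (List String)) (D : List (List (String × String))) :
    (pvA_ruleLoop rules D = none ∧
      pvFold (pvMatchIdx rules) D (rules.length, none) = (rules.length, none)) ∨
    (∃ nm, pvA_ruleLoop rules D = some nm ∧
      (pvFold (pvMatchIdx rules) D (rules.length, none)).1 < rules.length ∧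
      (pvFold (pvMatchIdx rules) D (rules.length, none)).2 = some nm) := by
  induction rules with
  | nil =>
    left
    refine ⟨rfl, ?_⟩
    have h0 : ∀ m ∈ D, pvMatchIdx ([] : List (List String)) m = 0 := by
      intro m _; rfl
    have := pvFold_stable (pvMatchIdx ([] : List (List String))) D none
    calc pvFold (pvMatchIdx []) D (([] : List (List String)).length, none)
        = pvFold (pvMatchIdx []) D (0, none) := rfl
      _ = (0, none) := this
      _ = (([] : List (List String)).length, none) := rfl
  | cons r rs ih =>
    cases h : pvA_scan r D with
    | some nm =>
      right
      refine ⟨nm, ?_, ?_, ?_⟩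
      · rw [pvA_ruleLoop, h]
      · rw [pvFold_zero r rs D nm h _ (by simp) none]; simp
      · rw [pvFold_zero r rs D nm h _ (by simp) none]
    | none =>
      have hshift : ∀ m ∈ D, pvMatchIdx (r :: rs) m = pvMatchIdx rs m + 1 := by
        intro m hm
        rw [pvMatchIdx_cons, if_neg]
        simp [pvScan_none r D h m hm]
      have heq : pvFold (pvMatchIdx (r :: rs)) D ((r :: rs).length, none) =
          ((pvFold (pvMatchIdx rs) D (rs.length, none)).1 + 1,
           (pvFold (pvMatchIdx rs) D (rs.length, none)).2) := by
        have := pvFold_shift (pvMatchIdx rs) (pvMatchIdx (r :: rs)) D hshift rs.length none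
        simpa using this
      rcases ih with ⟨h1, h2⟩ | ⟨nm, h1, h2, h3⟩
      · left
        refine ⟨?_, ?_⟩
        · rw [pvA_ruleLoop, h, h1]
        · rw [heq, h2]; simp
      · right
        refine ⟨nm, ?_, ?_, ?_⟩
        · rw [pvA_ruleLoop, h, h1]
        · rw [heq]; simpa using Nat.succ_lt_succ h2
        · rw [heq]; simpa using h3

theorem pvDedupe_eq_aux (ms : List (List (String × String)))
    (seen : PySem.Set (String × String × String)) (res : List (List (String × String))) :
    (ms.foldl
      (fun (st : PySem.Set (String × String × String) × List (List (String × String))) m =>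
        let k := ((PySem.Dict.mk m).getD "name" "", (PySem.Dict.mk m).getD "category" "",
                  (PySem.Dict.mk m).getD "relative_path" "")
        if PySem.Set.contains st.1 k then st else (PySem.Set.add st.1 k, st.2 ++ [m]))
      (seen, res)).2 = pvA_dedupeLoop ms seen res := by
  induction ms generalizing seen res with
  | nil => rfl
  | cons m rest ih =>
    rw [List.foldl_cons, pvA_dedupeLoop]
    by_cases hc : pvA_key m ∈ seen
    · have hc' : ((PySem.Dict.mk m).getD "name" "", (PySem.Dict.mk m).getD "category" "",
          (PySem.Dict.mk m).getD "relative_path" "") ∈ seen := by simpa [pvA_key] using hc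
      simp only [pvA_key] at *
      simpa [hc'] using ih seen res
    · have hc' : ((PySem.Dict.mk m).getD "name" "", (PySem.Dict.mk m).getD "category" "",
          (PySem.Dict.mk m).getD "relative_path" "") ∉ seen := by simpa [pvA_key] using hc
      simp only [pvA_key] at *
      simpa [hc'] using ih (PySem.Set.add seen (((PySem.Dict.mk m).getD "name" "", (PySem.Dict.mk m).getD "category" "",
          (PySem.Dict.mk m).getD "relative_path" ""))) (res ++ [m])

theorem pvDedupe_eq (models : List (List (String × String))) :
    pvB_dedupe models = dedupe_models models := by
  unfold pvB_dedupe dedupe_models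
  exact pvDedupe_eq_aux models PySem.Set.empty []

-- ===== VERDICT (by name: the statement is the Claim_ definition above) =====
theorem choose_first_by_rules_spec : Claim_equal_choose_first_by_rules := by
  intro models rules _ _
  unfold Spec_choose_first_by_rules choose_first_by_rules choose_first_by_rules_alt
  simp only [pvDedupe_eq, pvFoldB_eq]
  rcases pvKey2 rules (dedupe_models models) with ⟨h1, h2⟩ | ⟨nm, h1, h2, h3⟩
  · rw [h1, h2]
    simp
  · rw [h1, if_pos h2, h3]
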